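-- pv_equiv track=rewrite | github.com/benjaminmarriner/dds-mlr-bridge | code/data_cleaning.py | find_contract_from_auction
-- ===== SOURCE A (Python) =====
-- def find_contract_from_auction(auction:str) -> str:
--     """
--     Read the auction string backwards, and find the last contract bid, and whether it was (re)doubled.
--     Expects a clean auction. i.e. one that has been returned by validate_auction.
--     Returns the contract deducible from the auction in the normalized way. i.e. the way that normalize_contract would return it.
--     """
--
--     if not auction:
--         return ""
--
--     contract, double = "",""
--     for bid in reversed(auction.split(" ")):
--         if bid=="R":
--             double = "R"
--         elif bid=="X":
--             if double!="R":
--                 double = "X"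
--         elif bid!="P":
--             contract = bid
--             break
--     if contract=="":
--         return "P"
--     return contract+double
-- ===== SOURCE B (Python) =====
-- def find_contract_from_auction(auction: str) -> str:
--     """Forward single pass: remember the last contract bid seen and the calls after it."""
--     if not auction:
--         return ""
--     contract, tail = "", []
--     for bid in auction.split(" "):
--         if bid in ("P", "X", "R"):
--             tail.append(bid)
--         else:
--             contract, tail = bid, []
--     if contract == "":
--         return "P"
--     double = "R" if "R" in tail else "X" if "X" in tail else ""
--     return contract + double
-- ===== Notes on version B (the rewrite author's own statement) =====
-- stated objective: alternative
-- what changed: Replaced A's reverse scan with break and a stateful double variable by a single forward pass that remembers the last contract bid and collects the calls after it, deriving the doubling afterwards from membership tests on that collected tail (redouble taking precedence over double).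
import Mathlib
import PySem

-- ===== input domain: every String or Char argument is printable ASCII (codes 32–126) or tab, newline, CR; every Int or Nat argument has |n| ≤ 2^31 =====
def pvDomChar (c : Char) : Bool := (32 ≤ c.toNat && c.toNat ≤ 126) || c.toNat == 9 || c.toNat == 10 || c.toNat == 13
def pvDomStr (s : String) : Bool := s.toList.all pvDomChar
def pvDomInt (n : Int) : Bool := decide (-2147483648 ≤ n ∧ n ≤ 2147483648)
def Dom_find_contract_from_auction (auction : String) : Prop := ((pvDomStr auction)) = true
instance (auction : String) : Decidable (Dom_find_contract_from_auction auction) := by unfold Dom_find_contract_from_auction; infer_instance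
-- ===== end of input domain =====

-- B replaces A's reverse scan with break by one forward pass that remembers the
-- last contract bid and the calls after it (objective: alternative decomposition, same cost).

-- ===== PORT A =====
-- A's loop over reversed(auction.split(" ")) with state (contract, double) and break.
def pvALoop : List String → String → String × String
  | [], double => ("", double)
  | bid :: rest, double =>
    if bid == "R" then pvALoop rest "R"
    else if bid == "X" then pvALoop rest (if double != "R" then "X" else double)
    else if bid != "P" then (bid, double)
    else pvALoop rest double

def find_contract_from_auction (auction : String) : String :=
  if auction == "" then ""
  else
    let bids := (PySem.Str.split? auction " ").getD []   -- sep " " ≠ "", so split? is some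
    match pvALoop bids.reverse "" with
    | (contract, double) => if contract == "" then "P" else contract ++ double

-- ===== PORT B =====
-- B's forward loop: tail collects P/X/R calls, any other bid resets (contract, tail).
def pvBLoop : List String → String → List String → String × List String
  | [], contract, tail => (contract, tail)
  | bid :: rest, contract, tail =>
    if bid == "P" || bid == "X" || bid == "R" then pvBLoop rest contract (tail ++ [bid])
    else pvBLoop rest bid []

def find_contract_from_auction_alt (auction : String) : String :=
  if auction == "" then ""
  else
    let bids := (PySem.Str.split? auction " ").getD []
    match pvBLoop bids "" [] with
    | (contract, tail) =>
      if contract == "" then "P"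
      else
        let double := if tail.contains "R" then "R" else if tail.contains "X" then "X" else ""
        contract ++ double

-- ===== PRECONDITION & SPEC =====
def Spec_find_contract_from_auction (auction : String) (out : String) : Prop := out = find_contract_from_auction_alt auction
instance (auction : String) (out : String) : Decidable (Spec_find_contract_from_auction auction out) := by unfold Spec_find_contract_from_auction; infer_instance

-- ===== CLAIM (what is proved, stated in full; the proofs are below) =====
def Claim_equal_find_contract_from_auction : Prop := ∀ (auction : String), Dom_find_contract_from_auction auction → Spec_find_contract_from_auction auction (find_contract_from_auction auction)

-- ===== LEMMAS AND PROOFS =====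

-- the double A's scan produces, as a function of the tail's membership and the incoming state
def pvDd (tail : List String) (d : String) : String :=
  if tail.contains "R" || d == "R" then "R"
  else if tail.contains "X" then "X" else d

theorem pvBLoop_append (u v : List String) (c : String) (t : List String) :
    pvBLoop (u ++ v) c t = pvBLoop v (pvBLoop u c t).1 (pvBLoop u c t).2 := by
  induction u generalizing c t with
  | nil => simp [pvBLoop]
  | cons x xs ih =>
    simp only [List.cons_append, pvBLoop]
    split_ifs <;> exact ih _ _

theorem pvGen (l : List String) (d : String) :
    pvALoop l.reverse d = ((pvBLoop l "" []).1, pvDd (pvBLoop l "" []).2 d) := by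
  induction l using List.reverseRecOn generalizing d with
  | nil => simp [pvALoop, pvBLoop, pvDd]
  | append_singleton l x ih =>
    have hrev : (l ++ [x]).reverse = x :: l.reverse := by simp
    rw [hrev, pvBLoop_append]
    by_cases hR : x = "R"
    · subst hR
      simp only [pvALoop, pvBLoop, ih]
      simp [pvDd]
    · by_cases hX : x = "X"
      · subst hX
        rw [show pvALoop ("X" :: l.reverse) d = pvALoop l.reverse (if d != "R" then "X" else d) from by
          simp [pvALoop]]
        by_cases hd : d = "R"
        · subst hd
          simp [ih, pvDd, pvBLoop]
        · rw [show (if d != "R" then "X" else d) = "X" from by simp [bne, hd]]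
          rw [ih "X"]
          by_cases hc : ("R":String) ∈ (pvBLoop l "" []).2 <;>
            simp [pvDd, pvBLoop, hc, hd]
      · by_cases hP : x = "P"
        · subst hP
          simp only [pvALoop, pvBLoop, ih]
          simp [pvDd]
        · have h1 : (x == "R") = false := by simp [hR]
          have h2 : (x == "X") = false := by simp [hX]
          have h3 : (x == "P") = false := by simp [hP]
          simp only [pvALoop, pvBLoop, h1, h2, h3, Bool.or_self,
            bne, Bool.not_false, if_true]
          simp [pvDd]

theorem find_contract_from_auction_eq (auction : String) :
    find_contract_from_auction auction = find_contract_from_auction_alt auction := by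
  unfold find_contract_from_auction find_contract_from_auction_alt
  by_cases h : auction == ""
  · simp [h]
  · simp only [h]
    rw [pvGen]
    simp [pvDd]

-- ===== VERDICT (by name: the statement is the Claim_ definition above) =====
theorem find_contract_from_auction_spec : Claim_equal_find_contract_from_auction := by
  intro auction _
  unfold Spec_find_contract_from_auction
  exact find_contract_from_auction_eq auction
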